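-- pv_equiv track=rewrite | github.com/francescoBassi2002/Es_sistemi | Dijkstra.py | creazioneCampo
-- ===== SOURCE A (Python) =====
-- def creazioneCampo(pavi):
--     campo = []
--     cont = 0
--
--     for i in range(0, len(pavi)):
--         vet = []
--         for j in range(0, len(pavi)):
--             if pavi[i][j] == True:
--                 vet.append(cont)
--                 cont = cont + 1
--             else:
--                 vet.append(-1)
--         campo.append(vet)
--     return campo
-- ===== SOURCE B (Python) =====
-- def creazioneCampo(pavi):
--     n = len(pavi)
--     # pass 1: flatten the grid row-major (n columns per row, like A's j-loop)
--     cells = [row[j] for row in pavi for j in range(n)]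
--     # pass 2: exclusive prefix counts of True cells over the flat sequence
--     pref = []
--     cnt = 0
--     for c in cells:
--         pref.append(cnt)
--         cnt += 1 if c == True else 0
--     # pass 3: number True cells by their prefix count, -1 elsewhere
--     flat = [pref[k] if c == True else -1 for k, c in enumerate(cells)]
--     # reshape into n rows of n
--     return [flat[i * n:(i + 1) * n] for i in range(n)]
-- ===== Notes on version B (the rewrite author's own statement) =====
-- stated objective: alternative
-- what changed: Replaces A's nested index loops sharing a running counter with three separately-shaped passes: flatten the grid row-major, build an exclusive prefix-count table of True cells, assign each cell its prefix count (or -1), then reshape by slicing.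
import Mathlib
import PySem

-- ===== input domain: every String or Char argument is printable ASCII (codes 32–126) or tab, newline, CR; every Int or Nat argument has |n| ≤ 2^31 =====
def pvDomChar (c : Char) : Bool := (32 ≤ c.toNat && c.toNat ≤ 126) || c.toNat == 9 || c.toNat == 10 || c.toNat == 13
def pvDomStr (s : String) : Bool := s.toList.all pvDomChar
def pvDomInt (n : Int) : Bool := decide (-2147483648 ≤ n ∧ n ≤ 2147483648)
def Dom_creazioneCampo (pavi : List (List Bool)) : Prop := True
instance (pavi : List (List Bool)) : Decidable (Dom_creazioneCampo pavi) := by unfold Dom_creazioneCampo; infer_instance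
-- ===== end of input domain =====

-- B replaces A's nested counter-carrying loops with flatten / prefix-count table / assign / reshape passes (alternative decomposition, same cost).

-- ===== PORT A =====
-- literal port of A: nested for-loops over range(0, len(pavi)) carrying (campo, cont) resp. (vet, cont)
def creazioneCampo (pavi : List (List Bool)) : List (List Int) :=
  let n : Int := (pavi.length : Int)
  let res := (PySem.List.pyRange 0 n 1).foldl (fun (st : List (List Int) × Int) i =>
    let inner := (PySem.List.pyRange 0 n 1).foldl (fun (s : List Int × Int) j =>
      if PySem.List.pyGetD (PySem.List.pyGetD pavi i []) j false = true
      then (s.1 ++ [s.2], s.2 + 1)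
      else (s.1 ++ [(-1 : Int)], s.2)) (([] : List Int), st.2)
    (st.1 ++ [inner.1], inner.2)) (([] : List (List Int)), (0 : Int))
  res.1

-- ===== PORT B =====
-- literal port of Source B: flatten row-major, exclusive prefix counts, assign, reshape by slices
def creazioneCampo_alt (pavi : List (List Bool)) : List (List Int) :=
  let n : Int := (pavi.length : Int)
  let cells : List Bool := pavi.flatMap (fun row => (PySem.List.pyRange 0 n 1).map (fun j => PySem.List.pyGetD row j false))
  let pref : List Int := (cells.foldl (fun (s : List Int × Int) c => (s.1 ++ [s.2], s.2 + if c = true then 1 else 0)) (([] : List Int), (0 : Int))).1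
  let flat : List Int := (PySem.List.enumerate cells).map (fun kc => if kc.2 = true then PySem.List.pyGetD pref kc.1 0 else -1)
  (PySem.List.pyRange 0 n 1).map (fun i => PySem.List.slice flat (some (i * n)) (some ((i + 1) * n)))

-- ===== PRECONDITION & SPEC =====
-- Pre_ excludes exactly the ragged grids on which Python's pavi[i][j] raises IndexError (some row shorter than len(pavi)).
def Pre_creazioneCampo (pavi : List (List Bool)) : Prop := ∀ row ∈ pavi, pavi.length ≤ row.length
instance (pavi : List (List Bool)) : Decidable (Pre_creazioneCampo pavi) := by unfold Pre_creazioneCampo; infer_instance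
def pvWitness_creazioneCampo : List (List Bool) := [[true, false], [false, true]]

def Spec_creazioneCampo (pavi : List (List Bool)) (out : List (List Int)) : Prop := out = creazioneCampo_alt pavi
instance (pavi : List (List Bool)) (out : List (List Int)) : Decidable (Spec_creazioneCampo pavi out) := by unfold Spec_creazioneCampo; infer_instance

-- ===== CLAIM (what is proved, stated in full; the proofs are below) =====
def Claim_equal_creazioneCampo : Prop := ∀ (pavi : List (List Bool)), Dom_creazioneCampo pavi → Pre_creazioneCampo pavi → Spec_creazioneCampo pavi (creazioneCampo pavi)

-- ===== LEMMAS AND PROOFS =====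

-- number of True cells, as an Int
def pvCnt (bs : List Bool) : Int := ((bs.countP id : Nat) : Int)

-- canonical per-cell numbering starting at counter c
def pvGo : List Bool → Int → List Int
  | [], _ => []
  | b :: bs, c => (if b then c else -1) :: pvGo bs (c + if b then 1 else 0)

-- canonical per-row numbering
def pvRows : List (List Bool) → Int → List (List Int)
  | [], _ => []
  | r :: rs, c => pvGo r c :: pvRows rs (c + pvCnt r)

-- exclusive prefix counts starting at c
def pvPref : List Bool → Int → List Int
  | [], _ => []
  | b :: bs, c => c :: pvPref bs (c + if b then 1 else 0)

theorem pvCnt_nil : pvCnt [] = 0 := rfl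

theorem pvCnt_cons (b : Bool) (bs : List Bool) : pvCnt (b :: bs) = (if b then 1 else 0) + pvCnt bs := by
  simp only [pvCnt, List.countP_cons, id]
  cases b <;> simp <;> omega

theorem pvCnt_append (xs ys : List Bool) : pvCnt (xs ++ ys) = pvCnt xs + pvCnt ys := by
  simp [pvCnt, List.countP_append]

theorem pvGo_length (bs : List Bool) (c : Int) : (pvGo bs c).length = bs.length := by
  induction bs generalizing c with
  | nil => rfl
  | cons b bs ih => simp [pvGo, ih]

theorem pvGo_append (xs ys : List Bool) (c : Int) :
    pvGo (xs ++ ys) c = pvGo xs c ++ pvGo ys (c + pvCnt xs) := by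
  induction xs generalizing c with
  | nil => simp [pvGo, pvCnt_nil]
  | cons b bs ih =>
    simp only [List.cons_append, pvGo, ih, pvCnt_cons]
    have he : (c + if b = true then 1 else 0) + pvCnt bs = c + ((if b = true then 1 else 0) + pvCnt bs) := by ring
    rw [he]

theorem pvPref_length (bs : List Bool) (c : Int) : (pvPref bs c).length = bs.length := by
  induction bs generalizing c with
  | nil => rfl
  | cons b bs ih => simp [pvPref, ih]

theorem pvPref_getElem (bs : List Bool) (c : Int) (k : Nat) (hk : k < bs.length) :
    (pvPref bs c)[k]'(by rw [pvPref_length]; exact hk) = c + pvCnt (bs.take k) := by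
  induction bs generalizing c k with
  | nil => simp at hk
  | cons b bs ih =>
    cases k with
    | zero => simp [pvPref, pvCnt_nil]
    | succ k =>
      simp only [pvPref, List.getElem_cons_succ, List.take_succ_cons, pvCnt_cons]
      rw [ih _ k (by simpa using hk)]
      ring

theorem pvGo_getElem (bs : List Bool) (c : Int) (k : Nat) (hk : k < bs.length) :
    (pvGo bs c)[k]'(by rw [pvGo_length]; exact hk) =
      if bs[k] then c + pvCnt (bs.take k) else -1 := by
  induction bs generalizing c k with
  | nil => simp at hk
  | cons b bs ih =>
    cases k with
    | zero => simp [pvGo, pvCnt_nil]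
    | succ k =>
      simp only [pvGo, List.getElem_cons_succ, List.take_succ_cons, pvCnt_cons]
      rw [ih _ k (by simpa using hk)]
      split_ifs <;> ring

-- the per-row truncation: a loop over range(0, n) indexing a row of length ≥ n reads row.take n
theorem pvTake_map (row : List Bool) (n : Nat) (h : n ≤ row.length) (d : Bool) :
    (PySem.List.pyRange 0 (n : Int) 1).map (fun j => PySem.List.pyGetD row j d) = row.take n := by
  have hlen : (row.take n).length = n := by simp [h]
  have hmz := PySem.List.map_pyGetD_pyRange_zero (xs := row.take n) (d := d)
  rw [PySem.List.len_eq, hlen] at hmz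
  rw [← hmz]
  apply List.map_congr_left
  intro j hj
  rw [PySem.List.mem_pyRange_one] at hj
  obtain ⟨m, rfl⟩ : ∃ m : Nat, j = (m : Int) := ⟨j.toNat, (Int.toNat_of_nonneg hj.1).symm⟩
  have hm : m < n := by exact_mod_cast hj.2
  rw [PySem.List.pyGetD_natCast, PySem.List.pyGetD_natCast]
  simp [List.getD_eq_getElem?_getD, hm,
    List.getElem?_eq_getElem (by omega : m < row.length)]

-- A's inner loop
theorem pvInner (r : List Bool) (c : Int) (acc : List Int) :
    r.foldl (fun (s : List Int × Int) b =>
        if b = true then (s.1 ++ [s.2], s.2 + 1) else (s.1 ++ [(-1 : Int)], s.2)) (acc, c)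
      = (acc ++ pvGo r c, c + pvCnt r) := by
  induction r generalizing c acc with
  | nil => simp [pvGo, pvCnt_nil]
  | cons b bs ih =>
    cases b <;> simp only [List.foldl_cons, if_true, if_false, Bool.false_eq_true, pvGo, pvCnt_cons, ih] <;>
      (rw [Prod.mk.injEq]; constructor)
    · simp
    · ring
    · simp
    · ring

-- A's outer loop over truncated rows
theorem pvOuter (rs : List (List Bool)) (c : Int) (acc : List (List Int)) :
    rs.foldl (fun (st : List (List Int) × Int) r =>
        let inner := r.foldl (fun (s : List Int × Int) b =>
          if b = true then (s.1 ++ [s.2], s.2 + 1) else (s.1 ++ [(-1 : Int)], s.2)) (([] : List Int), st.2)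
        (st.1 ++ [inner.1], inner.2)) (acc, c)
      = (acc ++ pvRows rs c, c + pvCnt rs.flatten) := by
  induction rs generalizing c acc with
  | nil => simp [pvRows, pvCnt_nil]
  | cons r rs ih =>
    simp only [List.foldl_cons]
    rw [pvInner r c []]
    simp only [List.nil_append]
    rw [ih]
    simp only [pvRows, List.flatten_cons, pvCnt_append, Prod.mk.injEq]
    constructor
    · simp
    · ring

-- B's prefix-table loop
theorem pvPrefFold (bs : List Bool) (c : Int) (acc : List Int) :
    bs.foldl (fun (s : List Int × Int) b => (s.1 ++ [s.2], s.2 + if b = true then 1 else 0)) (acc, c)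
      = (acc ++ pvPref bs c, c + pvCnt bs) := by
  induction bs generalizing c acc with
  | nil => simp [pvPref, pvCnt_nil]
  | cons b bs ih =>
    cases b <;> simp only [List.foldl_cons, if_true, if_false, Bool.false_eq_true, pvPref, pvCnt_cons, ih] <;>
      (rw [Prod.mk.injEq]; constructor)
    · simp
    · ring
    · simp
    · ring

-- enumerate indexing
theorem pvEnum_getElem {α : Type} (xs : List α) (s : Int) (k : Nat) (hk : k < xs.length) :
    (PySem.List.enumerate xs s)[k]'(by rw [PySem.List.length_enumerate]; exact hk) = (s + k, xs[k]) := by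
  induction xs generalizing s k with
  | nil => simp at hk
  | cons x xs ih =>
    cases k with
    | zero => simp [PySem.List.enumerate_cons]
    | succ k =>
      have hk' : k < xs.length := by simpa using hk
      have step : (PySem.List.enumerate (x :: xs) s)[k+1]'(by
          rw [PySem.List.length_enumerate]; exact hk)
          = (PySem.List.enumerate xs (s+1))[k]'(by rw [PySem.List.length_enumerate]; exact hk') := by
        simp [PySem.List.enumerate_cons]
      rw [step, ih (s+1) k hk']
      rw [Prod.mk.injEq]
      constructor
      · push_cast; ring
      · simp

-- B's assignment pass computes pvGo
theorem pvFlat (cells : List Bool) (c : Int) :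
    (PySem.List.enumerate cells).map
        (fun kc => if kc.2 = true then PySem.List.pyGetD (pvPref cells c) kc.1 0 else -1)
      = pvGo cells c := by
  apply List.ext_getElem
  · simp [PySem.List.length_enumerate, pvGo_length]
  · intro k h1 h2
    have hk : k < cells.length := by simpa [PySem.List.length_enumerate] using h1
    rw [List.getElem_map]
    rw [pvEnum_getElem cells 0 k hk]
    rw [pvGo_getElem cells c k hk]
    by_cases hb : cells[k] = true <;> simp only [hb, if_true, zero_add]
    · rw [PySem.List.pyGetD_natCast]
      rw [List.getD_eq_getElem?_getD, List.getElem?_eq_getElem (by rw [pvPref_length]; exact hk)]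
      simp [pvPref_getElem cells c k hk]
    · simp

-- pvGo distributes over flatten as pvRows
theorem pvGo_flatten (rs : List (List Bool)) (c : Int) :
    pvGo rs.flatten c = (pvRows rs c).flatten := by
  induction rs generalizing c with
  | nil => rfl
  | cons r rs ih => simp [pvRows, pvGo_append, ih]

theorem pvRows_length (rs : List (List Bool)) (c : Int) : (pvRows rs c).length = rs.length := by
  induction rs generalizing c with
  | nil => rfl
  | cons r rs ih => simp [pvRows, ih]

-- slicing a flattened list of equal-length chunks recovers the chunks
theorem pvChunk (rss : List (List Int)) (n : Nat) (hall : ∀ r ∈ rss, r.length = n) :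
    (List.range rss.length).map (fun i => (rss.flatten.drop (i * n)).take n) = rss := by
  induction rss with
  | nil => rfl
  | cons r rs ih =>
    have hr : r.length = n := hall r (by simp)
    simp only [List.length_cons, List.range_succ_eq_map, List.map_cons, List.map_map]
    simp only [List.flatten_cons]
    congr 1
    · simp [hr]
    · have hmap : ∀ i ∈ List.range rs.length,
          ((fun i => List.take n (List.drop (i * n) (r ++ rs.flatten))) ∘ Nat.succ) i
            = List.take n (List.drop (i * n) rs.flatten) := by
        intro i _
        simp only [Function.comp]
        have he : Nat.succ i * n = r.length + i * n := by
          rw [Nat.succ_mul, hr, Nat.add_comm]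
        rw [he, List.drop_length_add_append]
      rw [List.map_congr_left hmap, ih (fun x hx => hall x (by simp [hx]))]

theorem pvCells_eq (pavi : List (List Bool)) (h : Pre_creazioneCampo pavi) :
    pavi.flatMap (fun row => (PySem.List.pyRange 0 (pavi.length : Int) 1).map
        (fun j => PySem.List.pyGetD row j false))
      = (pavi.map (fun r => r.take pavi.length)).flatten := by
  rw [List.flatMap_def]
  congr 1
  apply List.map_congr_left
  intro row hrow
  exact pvTake_map row pavi.length (h row hrow) false

-- ===== VERDICT (by name: the statement is the Claim_ definition above) =====
theorem creazioneCampo_spec : Claim_equal_creazioneCampo := by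
  intro pavi _ hpre
  unfold Spec_creazioneCampo creazioneCampo creazioneCampo_alt
  simp only []
  set n : Nat := pavi.length with hn
  -- A side
  have hA : ((PySem.List.pyRange 0 (n : Int) 1).foldl (fun (st : List (List Int) × Int) i =>
      let inner := (PySem.List.pyRange 0 (n : Int) 1).foldl (fun (s : List Int × Int) j =>
        if PySem.List.pyGetD (PySem.List.pyGetD pavi i []) j false = true
        then (s.1 ++ [s.2], s.2 + 1)
        else (s.1 ++ [(-1 : Int)], s.2)) (([] : List Int), st.2)
      (st.1 ++ [inner.1], inner.2)) (([] : List (List Int)), (0:Int))).1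
      = pvRows (pavi.map (fun r => r.take n)) 0 := by
    have houter := PySem.List.foldl_pyRange_zero_pyGetD (xs := pavi) (d := ([] : List Bool))
      (f := fun (st : List (List Int) × Int) (row : List Bool) =>
        let inner := (PySem.List.pyRange 0 (n : Int) 1).foldl (fun (s : List Int × Int) j =>
          if PySem.List.pyGetD row j false = true
          then (s.1 ++ [s.2], s.2 + 1)
          else (s.1 ++ [(-1 : Int)], s.2)) (([] : List Int), st.2)
        (st.1 ++ [inner.1], inner.2))
      (init := (([] : List (List Int)), (0:Int)))
    rw [PySem.List.len_eq] at houter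
    rw [houter]
    have hfold : pavi.foldl (fun (st : List (List Int) × Int) (row : List Bool) =>
        let inner := (PySem.List.pyRange 0 (n : Int) 1).foldl (fun (s : List Int × Int) j =>
          if PySem.List.pyGetD row j false = true
          then (s.1 ++ [s.2], s.2 + 1)
          else (s.1 ++ [(-1 : Int)], s.2)) (([] : List Int), st.2)
        (st.1 ++ [inner.1], inner.2)) (([] : List (List Int)), (0:Int))
        = (pavi.map (fun r => r.take n)).foldl (fun (st : List (List Int) × Int) r =>
          let inner := r.foldl (fun (s : List Int × Int) b =>
            if b = true then (s.1 ++ [s.2], s.2 + 1) else (s.1 ++ [(-1 : Int)], s.2)) (([] : List Int), st.2)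
          (st.1 ++ [inner.1], inner.2)) (([] : List (List Int)), (0:Int)) := by
      rw [List.foldl_map]
      apply PySem.List.foldl_congr_mem
      intro st row hrow
      simp only []
      have h2 := List.foldl_map (f := fun j => PySem.List.pyGetD row j false)
        (g := fun (s : List Int × Int) b =>
          if b = true then (s.1 ++ [s.2], s.2 + 1) else (s.1 ++ [(-1 : Int)], s.2))
        (l := PySem.List.pyRange 0 (n : Int) 1) (init := (([] : List Int), st.2))
      rw [pvTake_map row n (hpre row hrow) false] at h2
      have h1 : (PySem.List.pyRange 0 (n : Int) 1).foldl (fun (s : List Int × Int) j =>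
          if PySem.List.pyGetD row j false = true
          then (s.1 ++ [s.2], s.2 + 1)
          else (s.1 ++ [(-1 : Int)], s.2)) (([] : List Int), st.2)
          = (row.take n).foldl (fun (s : List Int × Int) b =>
            if b = true then (s.1 ++ [s.2], s.2 + 1) else (s.1 ++ [(-1 : Int)], s.2)) (([] : List Int), st.2) :=
        h2.symm
      rw [h1]
    rw [hfold, pvOuter]
    simp
  rw [hA]
  -- B side
  rw [pvCells_eq pavi hpre]
  set rows := pavi.map (fun r => r.take n) with hrows
  set cells := rows.flatten with hcells
  rw [pvPrefFold cells 0 []]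
  simp only [List.nil_append]
  rw [pvFlat cells 0, hcells, pvGo_flatten rows 0]
  -- reshape: pyRange over slices of the flattened numbering recovers pvRows
  have hall : ∀ r ∈ pvRows rows 0, r.length = n := by
    have hgen : ∀ (rs : List (List Bool)) (c : Int), (∀ x ∈ rs, x.length = n) →
        ∀ r ∈ pvRows rs c, r.length = n := by
      intro rs
      induction rs with
      | nil => intro c _ r hr; simp [pvRows] at hr
      | cons x xs ih =>
        intro c hlen r hr
        simp only [pvRows, List.mem_cons] at hr
        cases hr with
        | inl h => rw [h, pvGo_length]; exact hlen x (by simp)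
        | inr h => exact ih _ (fun y hy => hlen y (by simp [hy])) r h
    refine hgen rows 0 ?_
    intro x hx
    rw [hrows] at hx
    obtain ⟨y, hy, rfl⟩ := List.mem_map.mp hx
    rw [List.length_take]
    exact Nat.min_eq_left (hpre y hy)
  have hlen : (pvRows rows 0).length = n := by
    rw [pvRows_length, hrows, List.length_map]
  have hchunk := pvChunk (pvRows rows 0) n hall
  rw [hlen] at hchunk
  have hrange : PySem.List.pyRange 0 (n : Int) 1 = List.map (fun k : Nat => (k : Int)) (List.range n) := by
    rw [PySem.List.pyRange_one]
    simp only [Int.sub_zero, Int.toNat_natCast]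
    apply List.map_congr_left
    intro k _
    simp
  rw [hrange, List.map_map]
  conv_lhs => rw [← hchunk]
  apply List.map_congr_left
  intro i hi
  simp only [Function.comp]
  rw [PySem.List.slice_toNat _ (by positivity) (by positivity)]
  have e1 : ((i : Int) * (n : Int)) = ((i * n : Nat) : Int) := by push_cast; ring
  have e2 : (((i : Int) + 1) * (n : Int)) = (((i + 1) * n : Nat) : Int) := by push_cast; ring
  rw [e1, e2, Int.toNat_natCast, Int.toNat_natCast]
  have e3 : (i + 1) * n - i * n = n := by
    rw [Nat.add_mul, Nat.one_mul, Nat.add_sub_cancel_left]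
  rw [e3]
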